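-- pv_equiv track=rewrite | github.com/wyinan/tumblrtask | task_tumblr_parser.py | blognamestoblogitems
-- ===== SOURCE A (Python) =====
-- def blognamestoblogitems(_blognames):
--     if not _blognames:
--         return list()
--     _blogitems = list([
--         {'blogname': _blogname, 'postid': '', 'url': 'https://%s.tumblr.com' % _blogname}
--         for _blogname in _blognames])
--     _blogitems.sort(key=lambda k: (k.get('blogname', ''), k.get('postid', '')))
--     return _blogitems
-- ===== SOURCE B (Python) =====
-- def _merge(a, b):
--     out = []
--     i = j = 0
--     while i < len(a) and j < len(b):
--         if a[i] <= b[j]: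
--             out.append(a[i]); i += 1
--         else:
--             out.append(b[j]); j += 1
--     return out + a[i:] + b[j:]
--
--
-- def _msort(xs):
--     if len(xs) < 2:
--         return xs
--     mid = len(xs) // 2
--     return _merge(_msort(xs[:mid]), _msort(xs[mid:]))
--
--
-- def blognamestoblogitems(_blognames):
--     return [
--         {'blogname': n, 'postid': '', 'url': 'https://%s.tumblr.com' % n}
--         for n in _msort(list(_blognames))]
-- ===== Notes on version B (the rewrite author's own statement) =====
-- stated objective: alternative
-- what changed: B sorts the blog names itself with a hand-written recursive merge sort (split in halves, merge two sorted runs) and then builds each item dict over the already-sorted names, instead of building the unsorted dict list and calling the library sort with a dict-key-tuple comparator; equal names yield identical dicts, so stability differences cannot be observed.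
import Mathlib
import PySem

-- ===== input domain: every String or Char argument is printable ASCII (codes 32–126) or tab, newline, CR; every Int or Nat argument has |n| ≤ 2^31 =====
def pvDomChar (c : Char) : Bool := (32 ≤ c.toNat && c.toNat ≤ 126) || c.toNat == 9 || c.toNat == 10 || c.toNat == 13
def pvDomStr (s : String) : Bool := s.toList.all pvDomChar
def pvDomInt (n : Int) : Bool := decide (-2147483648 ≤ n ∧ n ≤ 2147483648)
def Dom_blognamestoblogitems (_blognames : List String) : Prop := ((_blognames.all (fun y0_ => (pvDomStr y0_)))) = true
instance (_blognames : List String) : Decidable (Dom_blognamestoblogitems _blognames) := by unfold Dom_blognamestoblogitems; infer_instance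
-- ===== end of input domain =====

-- B sorts the names with its own recursive merge sort and builds the item dicts over the
-- already-sorted names, instead of building unsorted dicts and library-sorting them by
-- key tuples (objective: alternative algorithm; equal names give identical dicts).

-- shared literal for the dict {'blogname': n, 'postid': '', 'url': 'https://%s.tumblr.com' % n}
def blogitem (n : String) : PySem.Dict String String :=
  PySem.Dict.ofList [("blogname", n), ("postid", ""), ("url", "https://" ++ n ++ ".tumblr.com")]

-- ===== PORT A =====
def blognamestoblogitems (_blognames : List String) : List (List (String × String)) :=
  if _blognames = [] then []
  else
    (PySem.List.sorted2 (_blognames.map blogitem)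
      (fun k => PySem.Dict.getD k "blogname" "")
      (fun k => PySem.Dict.getD k "postid" "")).map PySem.Dict.items

-- ===== PORT B =====
-- _merge(a, b): the while loop over indices i, j becomes the obvious structural recursion
def pvMerge : List String → List String → List String
  | [], b => b
  | a, [] => a
  | x :: xs, y :: ys =>
      if x ≤ y then x :: pvMerge xs (y :: ys) else y :: pvMerge (x :: xs) ys
termination_by a b => a.length + b.length

-- _msort(xs): split at len(xs)//2, sort both halves, merge
def pvMsort (xs : List String) : List String :=
  if xs.length < 2 then xs
  else pvMerge (pvMsort (xs.take (xs.length / 2))) (pvMsort (xs.drop (xs.length / 2)))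
termination_by xs.length
decreasing_by
  · simpa using Nat.lt_of_lt_of_le (Nat.div_lt_self (by omega) (by omega)) (le_refl _)
  · simp; omega

def blognamestoblogitems_alt (_blognames : List String) : List (List (String × String)) :=
  (pvMsort _blognames).map (fun n => (blogitem n).items)

-- ===== PRECONDITION & SPEC =====
def Spec_blognamestoblogitems (_blognames : List String) (out : List (List (String × String))) : Prop := out = blognamestoblogitems_alt _blognames
instance (_blognames : List String) (out : List (List (String × String))) : Decidable (Spec_blognamestoblogitems _blognames out) := by unfold Spec_blognamestoblogitems; infer_instance

-- ===== CLAIM (what is proved, stated in full; the proofs are below) =====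
def Claim_equal_blognamestoblogitems : Prop := ∀ (_blognames : List String), Dom_blognamestoblogitems _blognames → Spec_blognamestoblogitems _blognames (blognamestoblogitems _blognames)

-- ===== LEMMAS AND PROOFS =====

theorem getD_blogitem_blogname (n : String) :
    PySem.Dict.getD (blogitem n) "blogname" "" = n := by
  simp [blogitem, PySem.Dict.getD, PySem.Dict.get?, PySem.Dict.ofList, PySem.Dict.update,
    PySem.Dict.insert, PySem.Dict.contains, PySem.Dict.empty]

theorem getD_blogitem_postid (n : String) :
    PySem.Dict.getD (blogitem n) "postid" "" = "" := by
  simp [blogitem, PySem.Dict.getD, PySem.Dict.get?, PySem.Dict.ofList, PySem.Dict.update,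
    PySem.Dict.insert, PySem.Dict.contains, PySem.Dict.empty]

theorem insertBy_map {α β : Type} (f : α → β) (befA : β → β → Bool) (befB : α → α → Bool)
    (h : ∀ a b, befA (f a) (f b) = befB a b) (x : α) (ys : List α) :
    PySem.List.insertBy befA (f x) (ys.map f) = (PySem.List.insertBy befB x ys).map f := by
  induction ys with
  | nil => rfl
  | cons y t ih =>
    simp only [List.map, PySem.List.insertBy, h]
    by_cases hb : befB x y
    · simp [hb]
    · simp [hb, ih]

theorem foldl_insertBy_map {α β : Type} (f : α → β) (befA : β → β → Bool) (befB : α → α → Bool)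
    (h : ∀ a b, befA (f a) (f b) = befB a b) (xs acc : List α) :
    List.foldl (fun acc x => PySem.List.insertBy befA x acc) (acc.map f) (xs.map f)
      = (List.foldl (fun acc x => PySem.List.insertBy befB x acc) acc xs).map f := by
  induction xs generalizing acc with
  | nil => rfl
  | cons x t ih =>
    simp only [List.map, List.foldl]
    rw [insertBy_map f befA befB h, ih]

theorem before_blogitem (a b : String) :
    (decide (PySem.Dict.getD (blogitem a) "blogname" "" < PySem.Dict.getD (blogitem b) "blogname" "")
      || (!decide (PySem.Dict.getD (blogitem b) "blogname" "" < PySem.Dict.getD (blogitem a) "blogname" ""))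
         && decide (PySem.Dict.getD (blogitem a) "postid" "" < PySem.Dict.getD (blogitem b) "postid" ""))
      = decide (a < b) := by
  rw [getD_blogitem_blogname, getD_blogitem_blogname, getD_blogitem_postid, getD_blogitem_postid]
  simp

theorem pvMerge_perm (a b : List String) : (pvMerge a b).Perm (a ++ b) := by
  fun_induction pvMerge a b with
  | case1 b => simp
  | case2 a h => simp
  | case3 x xs y ys hxy ih =>
      exact ih.cons x
  | case4 x xs y ys hxy ih =>
      exact (ih.cons y).trans List.perm_middle.symm

theorem pvMerge_pairwise (a b : List String)
    (ha : a.Pairwise (· ≤ ·)) (hb : b.Pairwise (· ≤ ·)) :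
    (pvMerge a b).Pairwise (· ≤ ·) := by
  fun_induction pvMerge a b with
  | case1 b => exact hb
  | case2 a h => exact ha
  | case3 x xs y ys hxy ih =>
      have hxle : x ≤ y := hxy
      refine List.pairwise_cons.2 ⟨?_, ih (List.pairwise_cons.1 ha).2 hb⟩
      intro z hz
      have hz' : z ∈ xs ++ y :: ys := (pvMerge_perm _ _).subset hz
      rcases List.mem_append.1 hz' with h1 | h1
      · exact (List.pairwise_cons.1 ha).1 z h1
      · rcases List.mem_cons.1 h1 with rfl | h2
        · exact hxle
        · exact le_trans hxle ((List.pairwise_cons.1 hb).1 z h2)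
  | case4 x xs y ys hxy ih =>
      have hyle : y ≤ x := le_of_not_ge (by simpa using hxy)
      refine List.pairwise_cons.2 ⟨?_, ih ha (List.pairwise_cons.1 hb).2⟩
      intro z hz
      have hz' : z ∈ (x :: xs) ++ ys := (pvMerge_perm _ _).subset hz
      rcases List.mem_append.1 hz' with h1 | h1
      · rcases List.mem_cons.1 h1 with rfl | h2
        · exact hyle
        · exact le_trans hyle ((List.pairwise_cons.1 ha).1 z h2)
      · exact (List.pairwise_cons.1 hb).1 z h1

theorem pvMsort_perm (xs : List String) : (pvMsort xs).Perm xs := by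
  fun_induction pvMsort xs with
  | case1 xs h => exact List.Perm.refl xs
  | case2 xs h ih1 ih2 =>
      exact (pvMerge_perm _ _).trans ((ih1.append ih2).trans (by simp))

theorem pvMsort_pairwise (xs : List String) : (pvMsort xs).Pairwise (· ≤ ·) := by
  fun_induction pvMsort xs with
  | case1 xs h =>
      match xs, h with
      | [], _ => simp
      | [x], _ => simp
  | case2 xs h ih1 ih2 =>
      exact pvMerge_pairwise _ _ ih1 ih2

theorem pvMsort_eq_sorted (xs : List String) :
    PySem.List.sorted xs (fun x => x) false = pvMsort xs :=
  PySem.List.sorted_id_eq_of_perm_of_pairwise (xs := xs) (ys := pvMsort xs)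
    (pvMsort_perm xs) (pvMsort_pairwise xs)

-- ===== VERDICT (by name: the statement is the Claim_ definition above) =====
theorem blognamestoblogitems_spec : Claim_equal_blognamestoblogitems := by
  intro xs _
  show blognamestoblogitems xs = blognamestoblogitems_alt xs
  unfold blognamestoblogitems blognamestoblogitems_alt
  rw [← pvMsort_eq_sorted]
  by_cases hx : xs = []
  · simp [hx, PySem.List.sorted]
  · rw [if_neg hx]
    unfold PySem.List.sorted2 PySem.List.sorted
    simp only [Bool.false_eq_true, if_false]
    have := foldl_insertBy_map blogitem
      (fun a b => decide (PySem.Dict.getD a "blogname" "" < PySem.Dict.getD b "blogname" "")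
        || (!decide (PySem.Dict.getD b "blogname" "" < PySem.Dict.getD a "blogname" ""))
           && decide (PySem.Dict.getD a "postid" "" < PySem.Dict.getD b "postid" ""))
      (fun a b => decide (a < b))
      (fun a b => before_blogitem a b) xs []
    simp only [List.map_nil] at this
    rw [this, List.map_map]
    rfl
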